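-- pv_equiv track=rewrite | github.com/phungthanhloan1996/ai-recon-agent | ai/llm_analyzer.py | _rule_remediation_advice
-- ===== SOURCE A (Python) =====
-- from typing import Dict, List, Optional, Any, Tuple
--
-- def _rule_remediation_advice(data: Dict) -> str:
--     """Rule-based remediation advice"""
--     vulns = data.get('vulnerabilities', [])
--
--     advice = []
--     advice.append("## Remediation Recommendations\n\n")
--
--     # Group by type
--     sqli = [v for v in vulns if 'sql' in v.get('name', '').lower()]
--     xss = [v for v in vulns if 'xss' in v.get('name', '').lower()]
--     auth = [v for v in vulns if 'auth' in v.get('name', '').lower()]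
--
--     if sqli:
--         advice.append("### SQL Injection")
--         advice.append("- Use parameterized queries/prepared statements")
--         advice.append("- Implement input validation and sanitization")
--         advice.append("- Apply Web Application Firewall (WAF) rules")
--         advice.append("- Use ORM frameworks instead of raw SQL")
--
--     if xss:
--         advice.append("### Cross-Site Scripting")
--         advice.append("- Implement Content Security Policy (CSP)")
--         advice.append("- Sanitize and encode all user input")
--         advice.append("- Use HTTPOnly and Secure flags on cookies")
--         advice.append("- Implement input validation")
--
--     if auth:
--         advice.append("### Authentication Issues")
--         advice.append("- Implement multi-factor authentication")
--         advice.append("- Use strong password policies")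
--         advice.append("- Implement account lockout mechanisms")
--         advice.append("- Use secure session management")
--
--     return "\n".join(advice)
-- ===== SOURCE B (Python) =====
-- _BLOCKS = [
--     "### SQL Injection\n"
--     "- Use parameterized queries/prepared statements\n"
--     "- Implement input validation and sanitization\n"
--     "- Apply Web Application Firewall (WAF) rules\n"
--     "- Use ORM frameworks instead of raw SQL",
--     "### Cross-Site Scripting\n"
--     "- Implement Content Security Policy (CSP)\n"
--     "- Sanitize and encode all user input\n"
--     "- Use HTTPOnly and Secure flags on cookies\n"
--     "- Implement input validation",
--     "### Authentication Issues\n"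
--     "- Implement multi-factor authentication\n"
--     "- Use strong password policies\n"
--     "- Implement account lockout mechanisms\n"
--     "- Use secure session management",
-- ]
--
--
-- def _rule_remediation_advice(data):
--     """Rule-based remediation advice: one scan computes all category flags,
--     then the report is assembled by direct concatenation."""
--     flags = [False, False, False]
--     for v in data.get('vulnerabilities', []):
--         name = v.get('name', '').lower()
--         if 'sql' in name:
--             flags[0] = True
--         if 'xss' in name:
--             flags[1] = True
--         if 'auth' in name:
--             flags[2] = True
--         if all(flags):
--             break
--     out = "## Remediation Recommendations\n\n"
--     for flag, block in zip(flags, _BLOCKS):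
--         if flag:
--             out += "\n" + block
--     return out
-- ===== Notes on version B (the rewrite author's own statement) =====
-- stated objective: alternative
-- what changed: Replaces A's three separate full filtering passes plus a list-and-join assembly by ONE scan over the vulnerabilities that sets all three category flags simultaneously (breaking early once every flag is set), then builds the report by direct string concatenation per pre-joined block.
import Mathlib
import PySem

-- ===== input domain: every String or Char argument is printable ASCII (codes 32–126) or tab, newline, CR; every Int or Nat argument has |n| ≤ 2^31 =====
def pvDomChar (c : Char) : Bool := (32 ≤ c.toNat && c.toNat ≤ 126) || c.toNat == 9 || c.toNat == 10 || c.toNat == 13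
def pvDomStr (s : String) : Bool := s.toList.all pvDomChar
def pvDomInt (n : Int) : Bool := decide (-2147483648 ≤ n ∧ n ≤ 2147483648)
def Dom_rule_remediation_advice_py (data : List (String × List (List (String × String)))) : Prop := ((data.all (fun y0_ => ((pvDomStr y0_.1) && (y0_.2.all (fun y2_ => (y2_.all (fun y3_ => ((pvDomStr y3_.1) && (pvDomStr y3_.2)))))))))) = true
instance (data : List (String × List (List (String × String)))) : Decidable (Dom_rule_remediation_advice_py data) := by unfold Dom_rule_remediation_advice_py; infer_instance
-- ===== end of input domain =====

-- B replaces A's three filtering passes + list join by ONE scan computing all category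
-- flags (with early break) and direct string concatenation; return values proved equal.

-- shared helper: d.get(k, dflt) on an insertion-ordered association list (first match)
def pvGet {α : Type} (d : List (String × α)) (k : String) (dflt : α) : α :=
  match d with
  | [] => dflt
  | (k', v) :: t => if k' == k then v else pvGet t k dflt

-- ===== PORT A =====
def rule_remediation_advice_py (data : List (String × List (List (String × String)))) : String :=
  let vulns := pvGet data "vulnerabilities" []
  let advice : List String := ["## Remediation Recommendations\n\n"]
  let sqli := vulns.filter (fun v => PySem.Str.isIn "sql" (PySem.Str.lower (pvGet v "name" "")))
  let xss := vulns.filter (fun v => PySem.Str.isIn "xss" (PySem.Str.lower (pvGet v "name" "")))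
  let auth := vulns.filter (fun v => PySem.Str.isIn "auth" (PySem.Str.lower (pvGet v "name" "")))
  let advice := if sqli.isEmpty then advice else advice ++
    ["### SQL Injection",
     "- Use parameterized queries/prepared statements",
     "- Implement input validation and sanitization",
     "- Apply Web Application Firewall (WAF) rules",
     "- Use ORM frameworks instead of raw SQL"]
  let advice := if xss.isEmpty then advice else advice ++
    ["### Cross-Site Scripting",
     "- Implement Content Security Policy (CSP)",
     "- Sanitize and encode all user input",
     "- Use HTTPOnly and Secure flags on cookies",
     "- Implement input validation"]
  let advice := if auth.isEmpty then advice else advice ++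
    ["### Authentication Issues",
     "- Implement multi-factor authentication",
     "- Use strong password policies",
     "- Implement account lockout mechanisms",
     "- Use secure session management"]
  PySem.Str.join "\n" advice

-- ===== PORT B =====
def pvBlocks : List String :=
  ["### SQL Injection\n- Use parameterized queries/prepared statements\n- Implement input validation and sanitization\n- Apply Web Application Firewall (WAF) rules\n- Use ORM frameworks instead of raw SQL",
   "### Cross-Site Scripting\n- Implement Content Security Policy (CSP)\n- Sanitize and encode all user input\n- Use HTTPOnly and Secure flags on cookies\n- Implement input validation",
   "### Authentication Issues\n- Implement multi-factor authentication\n- Use strong password policies\n- Implement account lockout mechanisms\n- Use secure session management"]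

-- the single scan: sets each flag on a keyword hit, stops early once all three are set
def pvScan (vulns : List (List (String × String))) (f : Bool × Bool × Bool) : Bool × Bool × Bool :=
  match vulns with
  | [] => f
  | v :: t =>
    let name := PySem.Str.lower (pvGet v "name" "")
    let f1 := if PySem.Str.isIn "sql" name then true else f.1
    let f2 := if PySem.Str.isIn "xss" name then true else f.2.1
    let f3 := if PySem.Str.isIn "auth" name then true else f.2.2
    if f1 && f2 && f3 then (f1, f2, f3) else pvScan t (f1, f2, f3)

def rule_remediation_advice_py_alt (data : List (String × List (List (String × String)))) : String :=
  let vulns := pvGet data "vulnerabilities" []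
  let flags := pvScan vulns (false, false, false)
  ([(flags.1, pvBlocks[0]!), (flags.2.1, pvBlocks[1]!), (flags.2.2, pvBlocks[2]!)]).foldl
    (fun out fb => if fb.1 then out ++ "\n" ++ fb.2 else out)
    "## Remediation Recommendations\n\n"

-- ===== PRECONDITION & SPEC =====
def Spec_rule_remediation_advice_py (data : List (String × List (List (String × String)))) (out : String) : Prop := out = rule_remediation_advice_py_alt data
instance (data : List (String × List (List (String × String)))) (out : String) : Decidable (Spec_rule_remediation_advice_py data out) := by unfold Spec_rule_remediation_advice_py; infer_instance

-- ===== CLAIM (what is proved, stated in full; the proofs are below) =====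
def Claim_equal_rule_remediation_advice_py : Prop := ∀ (data : List (String × List (List (String × String)))), Dom_rule_remediation_advice_py data → Spec_rule_remediation_advice_py data (rule_remediation_advice_py data)

-- ===== LEMMAS AND PROOFS =====

theorem pv_filter_isEmpty {α : Type} (p : α → Bool) (l : List α) :
    (l.filter p).isEmpty = !l.any p := by
  induction l with
  | nil => rfl
  | cons x t ih =>
    by_cases h : p x <;> simp [List.any_cons, h, ih]

-- the early-exit scan computes exactly the three 'any' flags
theorem pvScan_eq_any (vulns : List (List (String × String))) (b1 b2 b3 : Bool) :
    pvScan vulns (b1, b2, b3) =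
      (b1 || vulns.any (fun v => PySem.Str.isIn "sql" (PySem.Str.lower (pvGet v "name" ""))),
       b2 || vulns.any (fun v => PySem.Str.isIn "xss" (PySem.Str.lower (pvGet v "name" ""))),
       b3 || vulns.any (fun v => PySem.Str.isIn "auth" (PySem.Str.lower (pvGet v "name" "")))) := by
  induction vulns generalizing b1 b2 b3 with
  | nil => simp [pvScan]
  | cons v t ih =>
    simp only [pvScan, List.any_cons]
    set n := PySem.Str.lower (pvGet v "name" "") with hn
    by_cases h1 : PySem.Str.isIn "sql" n <;>
    by_cases h2 : PySem.Str.isIn "xss" n <;>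
    by_cases h3 : PySem.Str.isIn "auth" n <;>
      simp only [h1, h2, h3, if_true, Bool.true_and, Bool.and_true, Bool.true_or,
        Bool.false_or] <;>
      cases b1 <;> cases b2 <;> cases b3 <;>
      simp_all [pvScan_all_true]
  where
    pvScan_all_true : ∀ (t : List (List (String × String))), pvScan t (true, true, true) = (true, true, true) := by
      intro t; cases t <;> simp [pvScan]

-- ===== VERDICT (by name: the statement is the Claim_ definition above) =====
set_option maxRecDepth 10000 in
set_option maxHeartbeats 2000000 in
theorem rule_remediation_advice_py_spec : Claim_equal_rule_remediation_advice_py := by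
  intro data _
  show rule_remediation_advice_py data = rule_remediation_advice_py_alt data
  unfold rule_remediation_advice_py rule_remediation_advice_py_alt pvBlocks
  simp only [pv_filter_isEmpty, Bool.not_eq_true', pvScan_eq_any, Bool.false_or, List.foldl]
  set vulns := pvGet data "vulnerabilities" ([] : List (List (String × String)))
  cases h1 : vulns.any (fun v => PySem.Str.isIn "sql" (PySem.Str.lower (pvGet v "name" ""))) <;>
  cases h2 : vulns.any (fun v => PySem.Str.isIn "xss" (PySem.Str.lower (pvGet v "name" ""))) <;>
  cases h3 : vulns.any (fun v => PySem.Str.isIn "auth" (PySem.Str.lower (pvGet v "name" ""))) <;>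
    simp only [Bool.false_eq_true, Bool.true_eq_false, if_false, if_true] <;> decide
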